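-- pv_equiv track=rewrite | github.com/pragmadox/pythonExamples | matrixfunctions.py | matrix_copy
-- ===== SOURCE A (Python) =====
-- def columns ( b ):
--     return len( b[0] )
--
-- def rows( b ):
--     return len( b )
--
-- def print_matrix( b ):
--     for row in range( rows( b )):
--         for col in range( columns( b )):
--             print ('%1d' %b[row][col], end = ' ',)
--         print (' ')
--
-- def matrix_copy( b ):
--     c = []
--     for row in range( len(b)):
--         lst = []
--         for col in range( len( b[row] )):
--             lst.append( b[row][col] )
--         c.append(lst)
--         print ('row %d of the new matrix' %row)
--         print_matrix(c)
--     return c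
-- ===== SOURCE B (Python) =====
-- def columns ( b ):
--     return len( b[0] )
--
-- def rows( b ):
--     return len( b )
--
-- def print_matrix( b ):
--     for row in range( rows( b )):
--         for col in range( columns( b )):
--             print ('%1d' %b[row][col], end = ' ',)
--         print (' ')
--
-- def matrix_copy( b ):
--     # recursive decomposition: copy all rows but the last, then append a
--     # slice-copy of the last row and display the partial result
--     if not b:
--         return []
--     c = matrix_copy(b[:-1])
--     c.append(b[-1][:])
--     print('row %d of the new matrix' % (len(b) - 1))
--     print_matrix(c)
--     return c
-- ===== Notes on version B (the rewrite author's own statement) =====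
-- stated objective: alternative
-- what changed: A builds the copy iteratively with nested index loops appending element by element; B recurses on b[:-1], copying the last row with a slice and appending it after the recursive call, so the loop-and-index machinery disappears in favour of structural recursion.
import Mathlib
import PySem

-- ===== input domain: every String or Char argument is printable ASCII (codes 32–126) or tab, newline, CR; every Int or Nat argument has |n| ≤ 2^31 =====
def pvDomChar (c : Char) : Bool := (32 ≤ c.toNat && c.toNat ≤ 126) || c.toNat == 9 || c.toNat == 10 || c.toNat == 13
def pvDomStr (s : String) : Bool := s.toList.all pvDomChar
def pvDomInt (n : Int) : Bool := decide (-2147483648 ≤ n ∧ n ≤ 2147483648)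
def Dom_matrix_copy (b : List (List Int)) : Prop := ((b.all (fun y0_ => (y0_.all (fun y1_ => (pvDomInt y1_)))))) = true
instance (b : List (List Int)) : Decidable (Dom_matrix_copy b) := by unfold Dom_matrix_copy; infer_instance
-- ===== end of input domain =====

-- B replaces A's nested index loops by structural recursion on b[:-1] (alternative decomposition);
-- the equivalence proved is about the RETURN value only — both Pythons also produce identical stdout.

-- ===== PORT A =====
-- nested index loops appending element by element; print statements have no effect on the return value
def matrix_copy (b : List (List Int)) : List (List Int) :=
  (PySem.List.pyRange 0 (b.length : Int) 1).foldl
    (fun c row =>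
      let brow := PySem.List.pyGetD b row []
      c ++ [(PySem.List.pyRange 0 (brow.length : Int) 1).foldl
              (fun lst col => lst ++ [PySem.List.pyGetD brow col 0]) []])
    []

-- ===== PORT B =====
-- if not b: return []; c = matrix_copy(b[:-1]); c.append(b[-1][:]); return c
-- (the display calls do not affect the return value)
def matrix_copy_alt (b : List (List Int)) : List (List Int) :=
  if h : b = [] then []
  else
    matrix_copy_alt (PySem.List.slice b none (some (-1))) ++
      [PySem.List.slice (PySem.List.pyGetD b (-1) []) none none]
termination_by b.length
decreasing_by
  simp only [PySem.List.slice_to_neg_one, List.length_dropLast]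
  have : b.length ≠ 0 := fun hz => h (List.length_eq_zero_iff.mp hz)
  omega

-- ===== PRECONDITION & SPEC =====
-- Pre_ excludes ragged inputs with a row shorter than row 0: there print_matrix (called by both
-- A and B after each row) raises IndexError, so A returns no value.
def Pre_matrix_copy (b : List (List Int)) : Prop :=
  ∀ r ∈ b, (b.headD []).length ≤ r.length
instance (b : List (List Int)) : Decidable (Pre_matrix_copy b) := by unfold Pre_matrix_copy; infer_instance
def pvWitness_matrix_copy : List (List Int) := [[1, 2], [3, 4], [5, 6, 7]]

def Spec_matrix_copy (b : List (List Int)) (out : List (List Int)) : Prop := out = matrix_copy_alt b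
instance (b : List (List Int)) (out : List (List Int)) : Decidable (Spec_matrix_copy b out) := by unfold Spec_matrix_copy; infer_instance

-- ===== CLAIM (what is proved, stated in full; the proofs are below) =====
def Claim_equal_matrix_copy : Prop := ∀ (b : List (List Int)), Dom_matrix_copy b → Pre_matrix_copy b → Spec_matrix_copy b (matrix_copy b)

-- ===== LEMMAS AND PROOFS =====
-- the inner append-loop of A over indices of xs rebuilds xs
theorem pv_inner_copy (xs : List Int) :
    (PySem.List.pyRange 0 (xs.length : Int) 1).foldl
      (fun lst col => lst ++ [PySem.List.pyGetD xs col 0]) [] = xs := by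
  rw [PySem.List.foldl_pyRange_zero_pyGetD' xs 0 (fun lst x => lst ++ [x]) []]
  simp only [PySem.List.foldl_append_singleton_eq_map]
  simp

-- A's port is the identity on the input matrix
theorem pv_A_id (b : List (List Int)) : matrix_copy b = b := by
  unfold matrix_copy
  rw [PySem.List.foldl_pyRange_zero_pyGetD' b []
      (fun c r => c ++ [(PySem.List.pyRange 0 (r.length : Int) 1).foldl
        (fun lst col => lst ++ [PySem.List.pyGetD r col 0]) []]) []]
  simp only [pv_inner_copy]
  simp only [PySem.List.foldl_append_singleton_eq_map]
  simp

-- B's recursion on b[:-1] is also the identity: dropLast ++ [getLast] = b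
theorem pv_B_id : ∀ (n : Nat) (b : List (List Int)), b.length ≤ n → matrix_copy_alt b = b := by
  intro n
  induction n with
  | zero =>
    intro b hb
    have : b = [] := List.length_eq_zero_iff.mp (Nat.le_zero.mp hb)
    subst this
    simp [matrix_copy_alt]
  | succ n ih =>
    intro b hb
    by_cases h : b = []
    · subst h; simp [matrix_copy_alt]
    · rw [matrix_copy_alt]
      simp only [h, dite_false, PySem.List.slice_to_neg_one,
        PySem.List.slice_none_none, PySem.List.pyGetD_neg_one _ _ h]
      rw [ih b.dropLast (by
        have : b.length ≠ 0 := fun hz => h (List.length_eq_zero_iff.mp hz)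
        simp only [List.length_dropLast]; omega)]
      exact List.dropLast_append_getLast h

-- ===== VERDICT (by name: the statement is the Claim_ definition above) =====
theorem matrix_copy_spec : Claim_equal_matrix_copy := by
  intro b _ _
  unfold Spec_matrix_copy
  rw [pv_A_id, pv_B_id b.length b le_rfl]
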